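-- pv_equiv track=rewrite | github.com/jschnable/pyMVP | pymvp/data/load_genotype_vcf.py | _code_dosage_split
-- ===== SOURCE A (Python) =====
-- MISSING = -9
--
-- def _code_dosage_split(gt_tokens, alt_index):
--     # alt_index is the 1-based index of ALT for the split
--     if not gt_tokens:
--         return MISSING, 0
--     allowed = {0, alt_index}
--     alt_count = 0
--     ploidy = 0
--     for token in gt_tokens:
--         if token == '.':
--             return MISSING, 0
--         try:
--             allele = int(token)
--         except ValueError:
--             return MISSING, 0
--         if allele not in allowed:
--             return MISSING, 0
--         ploidy += 1
--         if allele == alt_index: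
--             alt_count += 1
--     return alt_count, ploidy
-- ===== SOURCE B (Python) =====
-- MISSING = -9
--
-- def _code_dosage_split(gt_tokens, alt_index):
--     if not gt_tokens:
--         return MISSING, 0
--     try:
--         alleles = [int(t) for t in gt_tokens]
--     except ValueError:
--         return MISSING, 0
--     if any(a != 0 and a != alt_index for a in alleles):
--         return MISSING, 0
--     return alleles.count(alt_index), len(alleles)
-- ===== Notes on version B (the rewrite author's own statement) =====
-- stated objective: simpler
-- what changed: Replaces the single interleaved validate-and-count loop carrying two accumulators with a build-then-validate-then-count decomposition: parse all tokens at once (int('.') already raises ValueError, so the explicit '.' check disappears), reject with one any() scan, then return count/len directly.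
import Mathlib
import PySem

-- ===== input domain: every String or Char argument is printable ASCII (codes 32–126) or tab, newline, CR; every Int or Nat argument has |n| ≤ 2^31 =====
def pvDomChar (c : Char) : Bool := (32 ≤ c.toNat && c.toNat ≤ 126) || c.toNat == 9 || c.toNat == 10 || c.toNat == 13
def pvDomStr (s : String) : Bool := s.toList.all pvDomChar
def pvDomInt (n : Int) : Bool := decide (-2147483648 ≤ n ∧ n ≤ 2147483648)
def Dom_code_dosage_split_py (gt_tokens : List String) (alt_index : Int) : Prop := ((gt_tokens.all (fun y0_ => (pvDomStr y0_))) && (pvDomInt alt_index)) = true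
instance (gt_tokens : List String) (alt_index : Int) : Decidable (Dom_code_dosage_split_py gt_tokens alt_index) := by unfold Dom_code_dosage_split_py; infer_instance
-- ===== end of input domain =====

-- B replaces A's interleaved validate-and-count loop by parse-all / validate / count-and-length passes (simpler decomposition, same cost).

-- ===== PORT A =====
-- the for-loop of A: state (alt_count, ploidy); early returns become result values
def codeDosageLoopA (alt_index : Int) : List String → Int → Int → Int × Int
  | [], alt_count, ploidy => (alt_count, ploidy)
  | token :: rest, alt_count, ploidy =>
    if token = "." then (-9, 0)
    else
      match PySem.Int.ofStr? token with
      | none => (-9, 0)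
      | some allele =>
        if allele = 0 ∨ allele = alt_index then
          codeDosageLoopA alt_index rest (if allele = alt_index then alt_count + 1 else alt_count) (ploidy + 1)
        else (-9, 0)

def code_dosage_split_py (gt_tokens : List String) (alt_index : Int) : Int × Int :=
  if gt_tokens = [] then (-9, 0)
  else codeDosageLoopA alt_index gt_tokens 0 0

-- ===== PORT B =====
def code_dosage_split_py_alt (gt_tokens : List String) (alt_index : Int) : Int × Int :=
  if gt_tokens = [] then (-9, 0)
  else
    match gt_tokens.mapM PySem.Int.ofStr? with  -- [int(t) for t in gt_tokens] / except ValueError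
    | none => (-9, 0)
    | some alleles =>
      if alleles.any (fun a => a != 0 && a != alt_index) then (-9, 0)
      else ((alleles.count alt_index : Int), (alleles.length : Int))

-- ===== PRECONDITION & SPEC =====
def Spec_code_dosage_split_py (gt_tokens : List String) (alt_index : Int) (out : Int × Int) : Prop := out = code_dosage_split_py_alt gt_tokens alt_index
instance (gt_tokens : List String) (alt_index : Int) (out : Int × Int) : Decidable (Spec_code_dosage_split_py gt_tokens alt_index out) := by unfold Spec_code_dosage_split_py; infer_instance

-- ===== CLAIM (what is proved, stated in full; the proofs are below) =====
def Claim_equal_code_dosage_split_py : Prop := ∀ (gt_tokens : List String) (alt_index : Int), Dom_code_dosage_split_py gt_tokens alt_index → Spec_code_dosage_split_py gt_tokens alt_index (code_dosage_split_py gt_tokens alt_index)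

-- ===== LEMMAS AND PROOFS =====
lemma codeDosageLoopA_eq (alt_index : Int) (ts : List String) :
    ∀ ac p : Int, codeDosageLoopA alt_index ts ac p =
      match ts.mapM PySem.Int.ofStr? with
      | none => (-9, 0)
      | some as =>
        if as.any (fun a => a != 0 && a != alt_index) then (-9, 0)
        else (ac + (as.count alt_index : Int), p + (as.length : Int)) := by
  induction ts with
  | nil => intro ac p; simp [codeDosageLoopA, List.mapM, List.mapM.loop]
  | cons t rest ih =>
    intro ac p
    by_cases hdot : t = "."
    · subst hdot
      have h1 : PySem.Int.ofStr? "." = none := by decide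
      simp [codeDosageLoopA, List.mapM_cons, h1]
    · simp only [codeDosageLoopA, if_neg hdot, List.mapM_cons, Option.bind_eq_bind]
      cases hof : PySem.Int.ofStr? t with
      | none => simp
      | some a =>
        simp only [Option.bind_some]
        cases hm : rest.mapM PySem.Int.ofStr? with
        | none =>
          simp only [Option.bind_none]
          by_cases hok : a = 0 ∨ a = alt_index
          · rw [if_pos hok, ih, hm]
          · rw [if_neg hok]
        | some as =>
          simp only [Option.bind_some]
          have ih' : ∀ ac p : Int, codeDosageLoopA alt_index rest ac p =
              if (as.any fun x => x != 0 && x != alt_index) then (-9, 0)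
              else (ac + (as.count alt_index : Int), p + (as.length : Int)) := by
            intro ac p; rw [ih, hm]
          show (if a = 0 ∨ a = alt_index then
              codeDosageLoopA alt_index rest (if a = alt_index then ac + 1 else ac) (p + 1)
            else (-9, 0)) =
            if ((a :: as).any fun x => x != 0 && x != alt_index) then (-9, 0)
            else (ac + ((a :: as).count alt_index : Int), p + ((a :: as).length : Int))
          by_cases hok : a = 0 ∨ a = alt_index
          · have hnot : (a != 0 && a != alt_index) = false := by
              rcases hok with h | h <;> simp [h]
            rw [if_pos hok, ih', List.any_cons, hnot, Bool.false_or]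
            by_cases hbad : as.any (fun x => x != 0 && x != alt_index)
            · rw [if_pos hbad, if_pos hbad]
            · rw [if_neg hbad, if_neg hbad, List.count_cons, List.length_cons]
              by_cases ha : a = alt_index
              · have hb : (a == alt_index) = true := by simp [ha]
                rw [if_pos ha, hb, if_pos rfl]
                refine Prod.ext ?_ ?_ <;> · show _ = _; push_cast; ring
              · have hb : (a == alt_index) = false := by simp [ha]
                rw [if_neg ha, hb]
                simp only [Bool.false_eq_true, if_false]
                refine Prod.ext ?_ ?_ <;> · show _ = _; push_cast; ring
          · have hbad1 : (a != 0 && a != alt_index) = true := by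
              rw [not_or] at hok; simp [hok.1, hok.2]
            rw [if_neg hok, List.any_cons, hbad1, Bool.true_or, if_pos rfl]

-- ===== VERDICT (by name: the statement is the Claim_ definition above) =====
theorem code_dosage_split_py_spec : Claim_equal_code_dosage_split_py := by
  intro gt_tokens alt_index _
  unfold Spec_code_dosage_split_py code_dosage_split_py code_dosage_split_py_alt
  by_cases h : gt_tokens = []
  · simp [h]
  · rw [if_neg h, if_neg h, codeDosageLoopA_eq]
    cases gt_tokens.mapM PySem.Int.ofStr? with
    | none => rfl
    | some as => simp
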